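-- pv_equiv track=rewrite | github.com/HeinekenBottle/IRONFORGE | analysis/enhanced_session_adapter.py | _determine_event_family
-- ===== SOURCE A (Python) =====
-- def _determine_event_family(archaeological_type: str) -> str:
--     """Determine the event family for categorization"""
--     if 'fvg' in archaeological_type:
--         return 'fvg_family'
--     elif 'liquidity' in archaeological_type or 'sweep' in archaeological_type:
--         return 'liquidity_family'
--     elif 'expansion' in archaeological_type:
--         return 'expansion_family'
--     elif 'consolidation' in archaeological_type:
--         return 'consolidation_family'
--     elif 'retracement' in archaeological_type:
--         return 'retracement_family'
--     elif any(term in archaeological_type for term in ['regime', 'structural', 'volatility']):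
--         return 'structural_family'
--     elif 'session' in archaeological_type:
--         return 'session_markers'
--     elif 'archaeological' in archaeological_type:
--         return 'archaeological_zones'
--     else:
--         return 'unknown_family'
-- ===== SOURCE B (Python) =====
-- _KEYWORDS = (
--     (0, 'fvg', 'fvg_family'),
--     (1, 'liquidity', 'liquidity_family'),
--     (1, 'sweep', 'liquidity_family'),
--     (2, 'expansion', 'expansion_family'),
--     (3, 'consolidation', 'consolidation_family'),
--     (4, 'retracement', 'retracement_family'),
--     (5, 'regime', 'structural_family'),
--     (5, 'structural', 'structural_family'),
--     (5, 'volatility', 'structural_family'),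
--     (6, 'session', 'session_markers'),
--     (7, 'archaeological', 'archaeological_zones'),
-- )
--
-- def _determine_event_family(archaeological_type: str) -> str:
--     """Collect ALL matching keywords, then return the family of the
--     highest-priority (lowest-numbered) match; no short-circuit cascade."""
--     matches = [(p, fam) for p, kw, fam in _KEYWORDS if kw in archaeological_type]
--     if not matches:
--         return 'unknown_family'
--     return min(matches)[1]
-- ===== Notes on version B (the rewrite author's own statement) =====
-- stated objective: alternative
-- what changed: Instead of A's short-circuiting if/elif cascade, B collects ALL matching keywords from a priority-annotated table in one comprehension and returns the family of the minimum-priority match (min over tuples), with the fallback name only when nothing matched.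
import Mathlib
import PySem

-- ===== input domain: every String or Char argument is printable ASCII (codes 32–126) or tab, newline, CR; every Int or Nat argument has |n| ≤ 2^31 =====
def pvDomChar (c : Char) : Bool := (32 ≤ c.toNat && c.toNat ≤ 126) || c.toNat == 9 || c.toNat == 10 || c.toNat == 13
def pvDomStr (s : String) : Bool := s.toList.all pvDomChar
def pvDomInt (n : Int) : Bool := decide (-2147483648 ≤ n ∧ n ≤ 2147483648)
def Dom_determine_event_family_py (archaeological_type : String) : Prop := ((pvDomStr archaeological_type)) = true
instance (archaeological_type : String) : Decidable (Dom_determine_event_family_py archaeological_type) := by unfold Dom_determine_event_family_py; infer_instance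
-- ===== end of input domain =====

-- B replaces A's short-circuiting if/elif cascade by collecting ALL matching keywords and
-- taking the minimum-priority match (alternative decomposition; same behaviour).

-- ===== PORT A =====
def determine_event_family_py (archaeological_type : String) : String :=
  if PySem.Str.isIn "fvg" archaeological_type then "fvg_family"
  else if PySem.Str.isIn "liquidity" archaeological_type || PySem.Str.isIn "sweep" archaeological_type then "liquidity_family"
  else if PySem.Str.isIn "expansion" archaeological_type then "expansion_family"
  else if PySem.Str.isIn "consolidation" archaeological_type then "consolidation_family"
  else if PySem.Str.isIn "retracement" archaeological_type then "retracement_family"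
  else if (["regime", "structural", "volatility"].any fun term => PySem.Str.isIn term archaeological_type) then "structural_family"
  else if PySem.Str.isIn "session" archaeological_type then "session_markers"
  else if PySem.Str.isIn "archaeological" archaeological_type then "archaeological_zones"
  else "unknown_family"

-- ===== PORT B =====
def pvKeywords : List (Int × String × String) :=
  [ (0, "fvg", "fvg_family")
  , (1, "liquidity", "liquidity_family")
  , (1, "sweep", "liquidity_family")
  , (2, "expansion", "expansion_family")
  , (3, "consolidation", "consolidation_family")
  , (4, "retracement", "retracement_family")
  , (5, "regime", "structural_family")
  , (5, "structural", "structural_family")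
  , (5, "volatility", "structural_family")
  , (6, "session", "session_markers")
  , (7, "archaeological", "archaeological_zones") ]

-- Python's min over (priority, family) tuples is lexicographic with the first
-- extremal element winning; at equal priority the family strings in pvKeywords
-- are equal, so folding by priority with first-wins ties is exact.
def pvMinBy (m : Int × String) (rest : List (Int × String)) : Int × String :=
  rest.foldl (fun acc cur => if cur.1 < acc.1 then cur else acc) m

-- Source B: matches = [(p, fam) for p, kw, fam in _KEYWORDS if kw in s]; [] -> unknown; else min(matches)[1]
def determine_event_family_py_alt (archaeological_type : String) : String :=
  match (pvKeywords.filter (fun t => PySem.Str.isIn t.2.1 archaeological_type)).map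
      (fun t => (t.1, t.2.2)) with
  | [] => "unknown_family"
  | m :: rest => (pvMinBy m rest).2

-- ===== PRECONDITION & SPEC =====
def Spec_determine_event_family_py (archaeological_type : String) (out : String) : Prop := out = determine_event_family_py_alt archaeological_type
instance (archaeological_type : String) (out : String) : Decidable (Spec_determine_event_family_py archaeological_type out) := by unfold Spec_determine_event_family_py; infer_instance

-- ===== CLAIM (what is proved, stated in full; the proofs are below) =====
def Claim_equal_determine_event_family_py : Prop := ∀ (archaeological_type : String), Dom_determine_event_family_py archaeological_type → Spec_determine_event_family_py archaeological_type (determine_event_family_py archaeological_type)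

-- ===== LEMMAS AND PROOFS =====

-- The min-fold keeps its first argument when nothing later is strictly smaller.
theorem pvMinBy_head (m : Int × String) (rest : List (Int × String))
    (h : ∀ x ∈ rest, m.1 ≤ x.1) : pvMinBy m rest = m := by
  unfold pvMinBy
  induction rest with
  | nil => rfl
  | cons a t ih =>
    simp only [List.foldl_cons]
    rw [if_neg (not_lt.2 (h a (by simp)))]
    exact ih (fun x hx => h x (List.mem_cons_of_mem _ hx))

-- Every priority in the filtered/mapped hit list is bounded below if the source list is.
theorem pv_hits_bound (s : String) (k : Int) (l : List (Int × String × String))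
    (hl : ∀ t ∈ l, k ≤ t.1) :
    ∀ x ∈ (l.filter (fun t => PySem.Str.isIn t.2.1 s)).map (fun t => (t.1, t.2.2)), k ≤ x.1 := by
  intro x hx
  simp only [List.mem_map, List.mem_filter] at hx
  rcases hx with ⟨t, ⟨ht, _⟩, rfl⟩
  exact hl t ht

-- ===== VERDICT (by name: the statement is the Claim_ definition above) =====
theorem determine_event_family_py_spec : Claim_equal_determine_event_family_py := by
  intro s _
  unfold Spec_determine_event_family_py determine_event_family_py determine_event_family_py_alt
  split_ifs with h0 h1 h2 h3 h4 h5 h6 h7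
  · unfold pvKeywords
    rw [List.filter_cons_of_pos (by simpa using h0)]
    exact (congrArg Prod.snd (pvMinBy_head ((0:Int), "fvg_family") _ (pv_hits_bound s 0 [((1:Int), "liquidity", "liquidity_family"), ((1:Int), "sweep", "liquidity_family"), ((2:Int), "expansion", "expansion_family"), ((3:Int), "consolidation", "consolidation_family"), ((4:Int), "retracement", "retracement_family"), ((5:Int), "regime", "structural_family"), ((5:Int), "structural", "structural_family"), ((5:Int), "volatility", "structural_family"), ((6:Int), "session", "session_markers"), ((7:Int), "archaeological", "archaeological_zones")] (by decide)))).symm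
  · cases hl : PySem.Str.isIn "liquidity" s
    · have hsw : PySem.Str.isIn "sweep" s = true := by
        rw [hl] at h1; simpa using h1
      unfold pvKeywords
      rw [List.filter_cons_of_neg (by simpa using h0)]
      rw [List.filter_cons_of_neg (by simpa using hl)]
      rw [List.filter_cons_of_pos (by simpa using hsw)]
      exact (congrArg Prod.snd (pvMinBy_head ((1:Int), "liquidity_family") _ (pv_hits_bound s 1 [((2:Int), "expansion", "expansion_family"), ((3:Int), "consolidation", "consolidation_family"), ((4:Int), "retracement", "retracement_family"), ((5:Int), "regime", "structural_family"), ((5:Int), "structural", "structural_family"), ((5:Int), "volatility", "structural_family"), ((6:Int), "session", "session_markers"), ((7:Int), "archaeological", "archaeological_zones")] (by decide)))).symm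
    · unfold pvKeywords
      rw [List.filter_cons_of_neg (by simpa using h0)]
      rw [List.filter_cons_of_pos (by simpa using hl)]
      exact (congrArg Prod.snd (pvMinBy_head ((1:Int), "liquidity_family") _ (pv_hits_bound s 1 [((1:Int), "sweep", "liquidity_family"), ((2:Int), "expansion", "expansion_family"), ((3:Int), "consolidation", "consolidation_family"), ((4:Int), "retracement", "retracement_family"), ((5:Int), "regime", "structural_family"), ((5:Int), "structural", "structural_family"), ((5:Int), "volatility", "structural_family"), ((6:Int), "session", "session_markers"), ((7:Int), "archaeological", "archaeological_zones")] (by decide)))).symm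
  · simp only [Bool.or_eq_true, not_or, Bool.not_eq_true] at h1
    unfold pvKeywords
    rw [List.filter_cons_of_neg (by simpa using h0)]
    rw [List.filter_cons_of_neg (by simpa using h1.1)]
    rw [List.filter_cons_of_neg (by simpa using h1.2)]
    rw [List.filter_cons_of_pos (by simpa using h2)]
    exact (congrArg Prod.snd (pvMinBy_head ((2:Int), "expansion_family") _ (pv_hits_bound s 2 [((3:Int), "consolidation", "consolidation_family"), ((4:Int), "retracement", "retracement_family"), ((5:Int), "regime", "structural_family"), ((5:Int), "structural", "structural_family"), ((5:Int), "volatility", "structural_family"), ((6:Int), "session", "session_markers"), ((7:Int), "archaeological", "archaeological_zones")] (by decide)))).symm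
  · simp only [Bool.or_eq_true, not_or, Bool.not_eq_true] at h1
    unfold pvKeywords
    rw [List.filter_cons_of_neg (by simpa using h0)]
    rw [List.filter_cons_of_neg (by simpa using h1.1)]
    rw [List.filter_cons_of_neg (by simpa using h1.2)]
    rw [List.filter_cons_of_neg (by simpa using h2)]
    rw [List.filter_cons_of_pos (by simpa using h3)]
    exact (congrArg Prod.snd (pvMinBy_head ((3:Int), "consolidation_family") _ (pv_hits_bound s 3 [((4:Int), "retracement", "retracement_family"), ((5:Int), "regime", "structural_family"), ((5:Int), "structural", "structural_family"), ((5:Int), "volatility", "structural_family"), ((6:Int), "session", "session_markers"), ((7:Int), "archaeological", "archaeological_zones")] (by decide)))).symm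
  · simp only [Bool.or_eq_true, not_or, Bool.not_eq_true] at h1
    unfold pvKeywords
    rw [List.filter_cons_of_neg (by simpa using h0)]
    rw [List.filter_cons_of_neg (by simpa using h1.1)]
    rw [List.filter_cons_of_neg (by simpa using h1.2)]
    rw [List.filter_cons_of_neg (by simpa using h2)]
    rw [List.filter_cons_of_neg (by simpa using h3)]
    rw [List.filter_cons_of_pos (by simpa using h4)]
    exact (congrArg Prod.snd (pvMinBy_head ((4:Int), "retracement_family") _ (pv_hits_bound s 4 [((5:Int), "regime", "structural_family"), ((5:Int), "structural", "structural_family"), ((5:Int), "volatility", "structural_family"), ((6:Int), "session", "session_markers"), ((7:Int), "archaeological", "archaeological_zones")] (by decide)))).symm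
  · simp only [Bool.or_eq_true, not_or, Bool.not_eq_true] at h1
    cases hr : PySem.Str.isIn "regime" s
    · cases hst : PySem.Str.isIn "structural" s
      · have hv : PySem.Str.isIn "volatility" s = true := by
          simp only [List.any_cons, List.any_nil, Bool.or_eq_true, hr, hst] at h5
          simpa using h5
        unfold pvKeywords
        rw [List.filter_cons_of_neg (by simpa using h0)]
        rw [List.filter_cons_of_neg (by simpa using h1.1)]
        rw [List.filter_cons_of_neg (by simpa using h1.2)]
        rw [List.filter_cons_of_neg (by simpa using h2)]
        rw [List.filter_cons_of_neg (by simpa using h3)]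
        rw [List.filter_cons_of_neg (by simpa using h4)]
        rw [List.filter_cons_of_neg (by simpa using hr)]
        rw [List.filter_cons_of_neg (by simpa using hst)]
        rw [List.filter_cons_of_pos (by simpa using hv)]
        exact (congrArg Prod.snd (pvMinBy_head ((5:Int), "structural_family") _ (pv_hits_bound s 5 [((6:Int), "session", "session_markers"), ((7:Int), "archaeological", "archaeological_zones")] (by decide)))).symm
      · unfold pvKeywords
        rw [List.filter_cons_of_neg (by simpa using h0)]
        rw [List.filter_cons_of_neg (by simpa using h1.1)]
        rw [List.filter_cons_of_neg (by simpa using h1.2)]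
        rw [List.filter_cons_of_neg (by simpa using h2)]
        rw [List.filter_cons_of_neg (by simpa using h3)]
        rw [List.filter_cons_of_neg (by simpa using h4)]
        rw [List.filter_cons_of_neg (by simpa using hr)]
        rw [List.filter_cons_of_pos (by simpa using hst)]
        exact (congrArg Prod.snd (pvMinBy_head ((5:Int), "structural_family") _ (pv_hits_bound s 5 [((5:Int), "volatility", "structural_family"), ((6:Int), "session", "session_markers"), ((7:Int), "archaeological", "archaeological_zones")] (by decide)))).symm
    · unfold pvKeywords
      rw [List.filter_cons_of_neg (by simpa using h0)]
      rw [List.filter_cons_of_neg (by simpa using h1.1)]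
      rw [List.filter_cons_of_neg (by simpa using h1.2)]
      rw [List.filter_cons_of_neg (by simpa using h2)]
      rw [List.filter_cons_of_neg (by simpa using h3)]
      rw [List.filter_cons_of_neg (by simpa using h4)]
      rw [List.filter_cons_of_pos (by simpa using hr)]
      exact (congrArg Prod.snd (pvMinBy_head ((5:Int), "structural_family") _ (pv_hits_bound s 5 [((5:Int), "structural", "structural_family"), ((5:Int), "volatility", "structural_family"), ((6:Int), "session", "session_markers"), ((7:Int), "archaeological", "archaeological_zones")] (by decide)))).symm
  · simp only [Bool.or_eq_true, not_or, Bool.not_eq_true] at h1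
    simp only [List.any_cons, List.any_nil, Bool.or_eq_true, not_or, Bool.not_eq_true] at h5
    unfold pvKeywords
    rw [List.filter_cons_of_neg (by simpa using h0)]
    rw [List.filter_cons_of_neg (by simpa using h1.1)]
    rw [List.filter_cons_of_neg (by simpa using h1.2)]
    rw [List.filter_cons_of_neg (by simpa using h2)]
    rw [List.filter_cons_of_neg (by simpa using h3)]
    rw [List.filter_cons_of_neg (by simpa using h4)]
    rw [List.filter_cons_of_neg (by simpa using h5.1)]
    rw [List.filter_cons_of_neg (by simpa using h5.2.1)]
    rw [List.filter_cons_of_neg (by simpa using h5.2.2.1)]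
    rw [List.filter_cons_of_pos (by simpa using h6)]
    exact (congrArg Prod.snd (pvMinBy_head ((6:Int), "session_markers") _ (pv_hits_bound s 6 [((7:Int), "archaeological", "archaeological_zones")] (by decide)))).symm
  · simp only [Bool.or_eq_true, not_or, Bool.not_eq_true] at h1
    simp only [List.any_cons, List.any_nil, Bool.or_eq_true, not_or, Bool.not_eq_true] at h5
    unfold pvKeywords
    rw [List.filter_cons_of_neg (by simpa using h0)]
    rw [List.filter_cons_of_neg (by simpa using h1.1)]
    rw [List.filter_cons_of_neg (by simpa using h1.2)]
    rw [List.filter_cons_of_neg (by simpa using h2)]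
    rw [List.filter_cons_of_neg (by simpa using h3)]
    rw [List.filter_cons_of_neg (by simpa using h4)]
    rw [List.filter_cons_of_neg (by simpa using h5.1)]
    rw [List.filter_cons_of_neg (by simpa using h5.2.1)]
    rw [List.filter_cons_of_neg (by simpa using h5.2.2.1)]
    rw [List.filter_cons_of_neg (by simpa using h6)]
    rw [List.filter_cons_of_pos (by simpa using h7)]
    exact (congrArg Prod.snd (pvMinBy_head ((7:Int), "archaeological_zones") _ (pv_hits_bound s 7 [] (by decide)))).symm
  · simp only [Bool.or_eq_true, not_or, Bool.not_eq_true] at h1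
    simp only [List.any_cons, List.any_nil, Bool.or_eq_true, not_or, Bool.not_eq_true] at h5
    unfold pvKeywords
    rw [List.filter_cons_of_neg (by simpa using h0)]
    rw [List.filter_cons_of_neg (by simpa using h1.1)]
    rw [List.filter_cons_of_neg (by simpa using h1.2)]
    rw [List.filter_cons_of_neg (by simpa using h2)]
    rw [List.filter_cons_of_neg (by simpa using h3)]
    rw [List.filter_cons_of_neg (by simpa using h4)]
    rw [List.filter_cons_of_neg (by simpa using h5.1)]
    rw [List.filter_cons_of_neg (by simpa using h5.2.1)]
    rw [List.filter_cons_of_neg (by simpa using h5.2.2.1)]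
    rw [List.filter_cons_of_neg (by simpa using h6)]
    rw [List.filter_cons_of_neg (by simpa using h7)]
    rfl
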